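-- pv_equiv track=rewrite | github.com/Kenvesul/GeoDesignApp | api.py | validate_sheet_pile_params
-- ===== SOURCE A (Python) =====
-- def validate_sheet_pile_params(params: dict) -> list:
--     """
--     Validate run_sheet_pile_analysis() input dict.
--
--     Returns a list of error strings (empty = valid).
--     """
--     params = _normalise_sheet_pile_params(params)
--     errs = []
--     for f in ("h_retained", "phi_k", "gamma"):
--         if params.get(f) is None or params.get(f) == "":
--             errs.append(f"'{f}' is required.")
--     try:
--         h = float(params.get("h_retained", 0))
--         if h <= 0:
--             errs.append("h_retained must be > 0.")
--     except (TypeError, ValueError):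
--         errs.append("h_retained must be a number.")
--     try:
--         phi = float(params.get("phi_k", -1))
--         if not (0 < phi < 90):
--             errs.append("phi_k must be in (0, 90) degrees.")
--     except (TypeError, ValueError):
--         errs.append("phi_k must be a number.")
--     try:
--         g = float(params.get("gamma", 0))
--         if g <= 0:
--             errs.append("gamma must be > 0.")
--     except (TypeError, ValueError):
--         errs.append("gamma must be a number.")
--     try:
--         q = float(params.get("q", 0))
--         if q < 0:
--             errs.append("q (surcharge) must be >= 0.")
--     except (TypeError, ValueError):
--         errs.append("q must be a number.")
--     z_w_raw = params.get("z_w")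
--     if z_w_raw is not None and z_w_raw != "":
--         try:
--             z_w = float(z_w_raw)
--             if z_w < 0:
--                 errs.append("z_w must be >= 0.")
--         except (TypeError, ValueError):
--             errs.append("z_w must be a number.")
--     return errs
--
-- def _normalise_sheet_pile_params(params: dict | None) -> dict:
--     """
--     Accept legacy UI field names and map them to the canonical API schema.
--
--     This keeps the legacy Jinja form, the React SPA, and api.py aligned while
--     Phase 6 stabilisation is still in progress.
--     """
--     if not params:
--         return {}
--
--     norm = dict(params)
--
--     if norm.get("h_retained") in (None, "") and norm.get("h_retain") not in (None, ""):
--         norm["h_retained"] = norm.get("h_retain")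
--     if norm.get("q") in (None, "") and norm.get("surcharge_kpa") not in (None, ""):
--         norm["q"] = norm.get("surcharge_kpa")
--
--     prop_type = norm.get("prop_type")
--     if prop_type and norm.get("support") in (None, ""):
--         norm["support"] = "free" if prop_type == "cantilever" else "propped"
--
--     if prop_type and norm.get("z_prop") in (None, ""):
--         try:
--             h = float(norm["h_retained"])
--         except (KeyError, TypeError, ValueError):
--             return norm
--
--         if prop_type == "cantilever":
--             norm["z_prop"] = None
--         elif prop_type == "propped_mid":
--             norm["z_prop"] = -h / 2.0
--         else:
--             norm["z_prop"] = -h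
--
--     return norm
-- ===== SOURCE B (Python) =====
-- # B: skip building the normalised dict entirely -- resolve the two legacy
-- # aliases (h_retain, surcharge_kpa) inline, since validation never reads the
-- # support/z_prop keys _normalise writes -- and run one loop over a unified
-- # field-spec table that collects required-errors and value-errors in two
-- # accumulators (objective: simpler).
--
-- # name, alias, required, default (None = optional: skip when missing/empty),
-- # strict lower bound at 0?, upper bound, range message
-- _SPECS = (
--     ("h_retained", "h_retain",      True,  0,    True,  None, "h_retained must be > 0."),
--     ("phi_k",      None,            True,  -1,   True,  90,   "phi_k must be in (0, 90) degrees."),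
--     ("gamma",      None,            True,  0,    True,  None, "gamma must be > 0."),
--     ("q",          "surcharge_kpa", False, 0,    False, None, "q (surcharge) must be >= 0."),
--     ("z_w",        None,            False, None, False, None, "z_w must be >= 0."),
-- )
--
--
-- def validate_sheet_pile_params(params: dict) -> list:
--     params = params or {}
--     required_errs, value_errs = [], []
--     for name, alias, required, default, strict_lo, hi, range_msg in _SPECS:
--         v = params.get(name)
--         if (v is None or v == "") and alias is not None:
--             w = params.get(alias)
--             if w is not None and w != "":
--                 v = w
--         if required and (v is None or v == ""):
--             required_errs.append(f"'{name}' is required.")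
--         if v is None:
--             if default is None:
--                 continue  # optional field absent: nothing to check
--             v = default
--         elif v == "" and default is None:
--             continue  # optional field left blank: nothing to check
--         try:
--             x = float(v)
--         except (TypeError, ValueError):
--             value_errs.append(f"{name} must be a number.")
--             continue
--         bad = (x <= 0) if strict_lo else (x < 0)
--         if hi is not None and not (x < hi):
--             bad = True
--         if bad:
--             value_errs.append(range_msg)
--     return required_errs + value_errs
-- ===== Notes on version B (the rewrite author's own statement) =====
-- stated objective: simpler
-- what changed: B never builds the normalised dict: since validation reads none of the support/z_prop keys _normalise writes, it resolves the two legacy aliases (h_retain, surcharge_kpa) inline and replaces A's required loop plus four copy-pasted try/float blocks plus the z_w special case by one loop over a unified field-spec table collecting required-errors and value-errors in two accumulators.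
import Mathlib
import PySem

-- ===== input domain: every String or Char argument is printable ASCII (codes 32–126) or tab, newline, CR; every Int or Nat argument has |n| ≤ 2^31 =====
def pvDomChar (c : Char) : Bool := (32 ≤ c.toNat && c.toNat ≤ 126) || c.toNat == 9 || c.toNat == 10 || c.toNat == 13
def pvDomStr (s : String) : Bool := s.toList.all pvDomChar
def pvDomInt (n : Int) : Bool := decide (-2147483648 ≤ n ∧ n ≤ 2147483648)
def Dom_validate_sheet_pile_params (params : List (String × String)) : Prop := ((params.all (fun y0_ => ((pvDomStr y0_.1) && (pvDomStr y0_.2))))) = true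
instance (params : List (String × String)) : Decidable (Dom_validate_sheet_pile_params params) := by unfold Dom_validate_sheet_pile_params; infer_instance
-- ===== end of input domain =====

-- B drops the normalised-dict construction entirely (validation never reads the
-- support/z_prop keys _normalise writes), resolves the two legacy aliases inline and
-- runs ONE loop over a unified field-spec table with two error accumulators
-- (objective: simpler).
--
-- Both ports model the Python builtin float(str) (ASCII domain) by an exact parsed
-- representation (sign, digit value, fraction length, exponent | ±inf | nan) and model
-- the program's only float comparisons — against 0 and 90 — exactly at the IEEE-double
-- level: a nonzero magnitude ≤ 2^-1075 rounds to 0.0 and a magnitude ≥ 90 - 2^-47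
-- rounds to ≥ 90.0 (ties-to-even at both boundaries; overflow to ±inf never changes
-- these comparisons, so the exact magnitude is kept).

-- ----- shared model of float(str) -----
-- a run of digit/underscore characters, as Python's tokenizer takes it
def pvRunSpan (cs : List Char) : List Char × List Char :=
  cs.span (fun c => c.isDigit || c == '_')

-- Python underscore rule: a run may not start or end with '_' and has no adjacent "__"
def pvOkRun (r : List Char) : Bool :=
  r.head? != some '_' && r.getLast? != some '_' &&
    (r.zip r.tail).all (fun p => !(p.1 == '_' && p.2 == '_'))

def pvDigits (r : List Char) : List Char := r.filter (fun c => c != '_')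

def pvNatOfDigits (ds : List Char) : Nat := ds.foldl (fun a c => a * 10 + (c.toNat - 48)) 0

-- parse "digits[.digits]"; returns (mantissa digits value, #fraction digits, rest)
def pvMantissa? (body : List Char) : Option (Nat × Nat × List Char) :=
  let (irun, r1) := pvRunSpan body
  let (frun, r2) := match r1 with
    | '.' :: t => pvRunSpan t
    | _ => (([] : List Char), r1)
  if pvOkRun irun && pvOkRun frun && !(pvDigits irun ++ pvDigits frun).isEmpty then
    some (pvNatOfDigits (pvDigits irun ++ pvDigits frun), (pvDigits frun).length, r2)
  else none

-- optional exponent part: some (expNegative, exponent); rest = [] means exponent 0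
def pvExp? : List Char → Option (Bool × Nat)
  | [] => some (false, 0)
  | c :: t =>
    if c == 'e' || c == 'E' then
      let (eneg, ebody) := match t with
        | '+' :: u => (false, u)
        | '-' :: u => (true, u)
        | _ => (false, t)
      let (erun, r3) := pvRunSpan ebody
      if pvOkRun erun && !(pvDigits erun).isEmpty && r3.isEmpty then
        some (eneg, pvNatOfDigits (pvDigits erun))
      else none
    else none

def pvStripSign (cs : List Char) : Bool × List Char :=
  match cs with
  | '+' :: t => (false, t)
  | '-' :: t => (true, t)
  | _ => (false, cs)

-- the parsed value of a float literal: sign, mantissa digit value n, #fraction digits,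
-- decimal exponent — the real number is ±(n/10^flen)·10^e — or ±inf / nan
inductive PFloat
  | num (neg : Bool) (n flen : Nat) (e : Int)
  | pinf
  | ninf
  | nan
deriving DecidableEq, Repr

-- float(s): none exactly where Python raises ValueError
def pvFloatChars? (cs : List Char) : Option PFloat :=
  let s := PySem.Chars.strip cs
  let (neg, body) := pvStripSign s
  let lb := PySem.Chars.lower body
  if lb == "inf".toList || lb == "infinity".toList then
    some (if neg then .ninf else .pinf)
  else if lb == "nan".toList then some .nan
  else
    match pvMantissa? body with
    | none => none
    | some (n, flen, rest) =>
      match pvExp? rest with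
      | none => none
      | some (eneg, e) => some (.num neg n flen (if eneg then -(e : Int) else (e : Int)))

def pyFloat? (s : String) : Option PFloat := pvFloatChars? s.toList

-- float(i) for an int i (never raises)
def pfOfInt (i : Int) : PFloat := .num (decide (i < 0)) i.natAbs 0 0

-- number of decimal digits of n (n ≥ 1), via str(n)
def pvD10 (n : Nat) : Nat := (PySem.Int.toChars (n : Int)).length

-- |±(n/10^flen)·10^e| ≤ 2^-1075, i.e. the double rounds to ±0.0 (ties-to-even):
-- decided by the decimal-exponent band, exact comparison only in the boundary band
def pvMagLeTiny (n flen : Nat) (e : Int) : Bool :=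
  if n == 0 then true
  else
    let E : Int := (pvD10 n : Int) + e - (flen : Int)
    if E ≤ -324 then true
    else if -322 ≤ E then false
    else decide (n * 2 ^ 1075 ≤ 10 ^ (pvD10 n + 323))

-- |±(n/10^flen)·10^e| < b - 2^-47: the double is < b; the bands and the 2^-47
-- half-ulp cutoff are exact for the one upper bound the program compares against (90)
def pvMagLtBound (n flen : Nat) (e : Int) (b : Int) : Bool :=
  if n == 0 then true
  else
    let d := pvD10 n
    let E : Int := (d : Int) + e - (flen : Int)
    if E ≤ 1 then true
    else if 3 ≤ E then false
    else if d ≤ 2 then decide ((n : Int) * 10 ^ (2 - d) * 2 ^ 47 < b * 2 ^ 47 - 1)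
    else decide ((n : Int) * 2 ^ 47 < (b * 2 ^ 47 - 1) * 10 ^ (d - 2))

-- the four double comparisons the program performs, on the parsed value
def pfLE0 : PFloat → Bool            -- float(v) <= 0
  | .pinf => false
  | .ninf => true
  | .nan => false
  | .num neg n flen e => neg || n == 0 || pvMagLeTiny n flen e

def pfGT0 : PFloat → Bool            -- 0 < float(v)
  | .pinf => true
  | .ninf => false
  | .nan => false
  | .num neg n flen e => !neg && !(n == 0) && !pvMagLeTiny n flen e

def pfLT0 : PFloat → Bool            -- float(v) < 0
  | .pinf => false
  | .ninf => true
  | .nan => false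
  | .num neg n flen e => neg && !(n == 0) && !pvMagLeTiny n flen e

def pfLtBound (x : PFloat) (b : Int) : Bool   -- float(v) < b (exact for b = 90)
  := match x with
  | .pinf => false
  | .ninf => true
  | .nan => false
  | .num neg n flen e => neg || n == 0 || pvMagLtBound n flen e b

-- ===== PORT A =====
-- values flowing through the normalised dict: str | float | None
inductive PVal
  | str (v : String)
  | flt (x : PFloat)
  | pynone
deriving DecidableEq, Repr

-- float(v); none where Python raises TypeError (None) or ValueError (bad string)
def pvFloatOfVal? : PVal → Option PFloat
  | .str v => pyFloat? v
  | .flt x => some x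
  | .pynone => none

-- Python's  "x is None or x == ''"  (get? = none means absent, i.e. .get() returned None)
def pvIsNoneOrEmpty : Option PVal → Bool
  | Option.none => true
  | some .pynone => true
  | some (.str v) => v == ""
  | some (.flt _) => false

-- Python truthiness of a dict.get result
def pvTruthy : Option PVal → Bool
  | some (.str v) => !(v == "")
  | some (.flt x) => !(x == .num false 0 0 0)
  | some .pynone => false
  | Option.none => false

-- exact -h and -(h/2); z_prop is never read by the validator, so the (unobservable)
-- IEEE rounding of h/2.0 on subnormals is not modelled
def pfNeg : PFloat → PFloat
  | .num neg n flen e => .num (!neg) n flen e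
  | .pinf => .ninf
  | .ninf => .pinf
  | .nan => .nan

def pfNegHalf : PFloat → PFloat
  | .num neg n flen e => .num (!neg) (n * 5) (flen + 1) e
  | .pinf => .ninf
  | .ninf => .pinf
  | .nan => .nan

-- _normalise_sheet_pile_params, step for step
def pvNormalise (params : List (String × String)) : PySem.Dict String PVal :=
  if params.isEmpty then PySem.Dict.empty
  else
    let norm := PySem.Dict.ofList (params.map (fun p => (p.1, PVal.str p.2)))
    let norm := if pvIsNoneOrEmpty (norm.get? "h_retained") && !pvIsNoneOrEmpty (norm.get? "h_retain")
      then norm.insert "h_retained" (norm.getD "h_retain" PVal.pynone) else norm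
    let norm := if pvIsNoneOrEmpty (norm.get? "q") && !pvIsNoneOrEmpty (norm.get? "surcharge_kpa")
      then norm.insert "q" (norm.getD "surcharge_kpa" PVal.pynone) else norm
    let propType := norm.get? "prop_type"
    let norm := if pvTruthy propType && pvIsNoneOrEmpty (norm.get? "support")
      then norm.insert "support" (if propType == some (PVal.str "cantilever") then PVal.str "free" else PVal.str "propped")
      else norm
    if pvTruthy propType && pvIsNoneOrEmpty (norm.get? "z_prop") then
      match norm.get? "h_retained" with
      | Option.none => norm          -- KeyError, caught: return norm
      | some v =>
        match pvFloatOfVal? v with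
        | Option.none => norm        -- TypeError/ValueError, caught: return norm
        | some h =>
          if propType == some (PVal.str "cantilever") then norm.insert "z_prop" PVal.pynone
          else if propType == some (PVal.str "propped_mid") then
            norm.insert "z_prop" (PVal.flt (pfNegHalf h))   -- -h / 2.0
          else norm.insert "z_prop" (PVal.flt (pfNeg h))    -- -h
    else norm

def validate_sheet_pile_params (params : List (String × String)) : List String :=
  let p := pvNormalise params
  let errs : List String := ["h_retained", "phi_k", "gamma"].foldl
    (fun errs f => if pvIsNoneOrEmpty (p.get? f) then errs ++ ["'" ++ f ++ "' is required."] else errs) []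
  let errs := match pvFloatOfVal? (p.getD "h_retained" (PVal.flt (pfOfInt 0))) with
    | some h => if pfLE0 h then errs ++ ["h_retained must be > 0."] else errs
    | Option.none => errs ++ ["h_retained must be a number."]
  let errs := match pvFloatOfVal? (p.getD "phi_k" (PVal.flt (pfOfInt (-1)))) with
    | some phi => if !(pfGT0 phi && pfLtBound phi 90) then errs ++ ["phi_k must be in (0, 90) degrees."] else errs
    | Option.none => errs ++ ["phi_k must be a number."]
  let errs := match pvFloatOfVal? (p.getD "gamma" (PVal.flt (pfOfInt 0))) with
    | some g => if pfLE0 g then errs ++ ["gamma must be > 0."] else errs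
    | Option.none => errs ++ ["gamma must be a number."]
  let errs := match pvFloatOfVal? (p.getD "q" (PVal.flt (pfOfInt 0))) with
    | some q => if pfLT0 q then errs ++ ["q (surcharge) must be >= 0."] else errs
    | Option.none => errs ++ ["q must be a number."]
  let zwRaw := p.get? "z_w"
  if pvIsNoneOrEmpty zwRaw then errs       -- guard: z_w_raw is not None and z_w_raw != ""
  else match zwRaw with
    | some v =>
      (match pvFloatOfVal? v with
       | some z => if pfLT0 z then errs ++ ["z_w must be >= 0."] else errs
       | Option.none => errs ++ ["z_w must be a number."])
    | Option.none => errs                  -- unreachable (guard), kept for totality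

-- ===== PORT B =====
-- the _SPECS table: name, ali, required, default (none = optional field: skip when
-- missing or blank), strict lower bound at 0?, upper bound, range message
def pvSpecs : List (String × Option String × Bool × Option Int × Bool × Option Int × String) :=
  [("h_retained", some "h_retain", true, some 0, true, Option.none, "h_retained must be > 0."),
   ("phi_k", Option.none, true, some (-1), true, some 90, "phi_k must be in (0, 90) degrees."),
   ("gamma", Option.none, true, some 0, true, Option.none, "gamma must be > 0."),
   ("q", some "surcharge_kpa", false, some 0, false, Option.none, "q (surcharge) must be >= 0."),
   ("z_w", Option.none, false, Option.none, false, Option.none, "z_w must be >= 0.")]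

-- the numeric half of one loop iteration: x? = float(v) (none = TypeError/ValueError)
def pvCheck (acc : List String × List String) (name : String) (strictLo : Bool)
    (hi : Option Int) (rangeMsg : String) (x? : Option PFloat) : List String × List String :=
  match x? with
  | Option.none => (acc.1, acc.2 ++ [name ++ " must be a number."])
  | some x =>
    let bad := if strictLo then pfLE0 x else pfLT0 x
    let bad := bad || (match hi with | some b => !pfLtBound x b | Option.none => false)
    if bad then (acc.1, acc.2 ++ [rangeMsg]) else acc

-- one loop iteration of B: resolve the ali, collect the required error, check the value
def pvStep (d : PySem.Dict String String) (acc : List String × List String)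
    (s : String × Option String × Bool × Option Int × Bool × Option Int × String) :
    List String × List String :=
  match s with
  | (name, ali, required, default, strictLo, hi, rangeMsg) =>
    let v := d.get? name
    let v := if v == Option.none || v == some "" then
        match ali with
        | some al =>
          (match d.get? al with
           | some w => if w == "" then v else some w
           | Option.none => v)
        | Option.none => v
      else v
    let acc := if required && (v == Option.none || v == some "") then
        (acc.1 ++ ["'" ++ name ++ "' is required."], acc.2)
      else acc
    match v with
    | Option.none =>
      (match default with
       | Option.none => acc                                       -- optional field absent
       | some dflt => pvCheck acc name strictLo hi rangeMsg (some (pfOfInt dflt)))  -- float(int)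
    | some sv =>
      if sv == "" && default == Option.none then acc              -- optional field blank
      else pvCheck acc name strictLo hi rangeMsg (pyFloat? sv)

def validate_sheet_pile_params_alt (params : List (String × String)) : List String :=
  let d := PySem.Dict.ofList params          -- "params or {}": ofList [] is the empty dict
  let acc := pvSpecs.foldl (pvStep d) ([], [])
  acc.1 ++ acc.2

-- ===== PRECONDITION & SPEC =====
def Spec_validate_sheet_pile_params (params : List (String × String)) (out : List String) : Prop := out = validate_sheet_pile_params_alt params
instance (params : List (String × String)) (out : List String) : Decidable (Spec_validate_sheet_pile_params params out) := by unfold Spec_validate_sheet_pile_params; infer_instance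

-- ===== CLAIM =====
def Claim_equal_validate_sheet_pile_params : Prop := ∀ (params : List (String × String)), Dom_validate_sheet_pile_params params → Spec_validate_sheet_pile_params params (validate_sheet_pile_params params)

-- ===== LEMMAS AND PROOFS =====

-- A's dict of wrapped strings looks up as the plain string dict, wrapped
theorem pv_get?_foldl_insert_wrap (l : List (String × String)) (d : PySem.Dict String String)
    (d' : PySem.Dict String PVal) (h : ∀ k, d'.get? k = (d.get? k).map PVal.str) (k : String) :
    (l.foldl (fun a p => a.insert p.1 (PVal.str p.2)) d').get? k
      = ((l.foldl (fun a p => a.insert p.1 p.2) d).get? k).map PVal.str := by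
  induction l generalizing d d' with
  | nil => exact h k
  | cons p t ih =>
    simp only [List.foldl]
    exact ih _ _ (fun k => by
      rw [PySem.Dict.get?_insert, PySem.Dict.get?_insert]
      split <;> simp [h])

theorem pv_base_get (params : List (String × String)) (k : String) :
    (PySem.Dict.ofList (params.map (fun p => (p.1, PVal.str p.2)))).get? k
      = ((PySem.Dict.ofList params).get? k).map PVal.str := by
  unfold PySem.Dict.ofList PySem.Dict.update
  rw [List.foldl_map]
  exact pv_get?_foldl_insert_wrap params _ _ (fun k => by simp) k

-- first-nonempty alias resolution (B's inline chain, named for the proofs)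
def pvOr (v w : Option String) : Option String :=
  if v == Option.none || v == some "" then
    match w with
    | some s => if s == "" then v else some s
    | Option.none => v
  else v

-- the dict lookup both sides reduce to
def pvG (params : List (String × String)) (k : String) : Option String :=
  (PySem.Dict.ofList params).get? k

def pvResolve (d : PySem.Dict String String)
    (name : String) (ali : Option String) : Option String :=
  match ali with
  | some al => pvOr (d.get? name) (d.get? al)
  | Option.none => d.get? name

-- the two error lists one iteration of B contributes
def pvRpart (d : PySem.Dict String String)
    (s : String × Option String × Bool × Option Int × Bool × Option Int × String) : List String :=
  match s with
  | (name, ali, required, _, _, _, _) =>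
    let v := pvResolve d name ali
    if required && (v == Option.none || v == some "") then ["'" ++ name ++ "' is required."] else []

def pvVcheck (name : String) (strictLo : Bool) (hi : Option Int) (rangeMsg : String)
    (x? : Option PFloat) : List String :=
  match x? with
  | Option.none => [name ++ " must be a number."]
  | some x =>
    if (if strictLo then pfLE0 x else pfLT0 x)
        || (match hi with | some b => !pfLtBound x b | Option.none => false) then [rangeMsg]
    else []

def pvVpart (d : PySem.Dict String String)
    (s : String × Option String × Bool × Option Int × Bool × Option Int × String) : List String :=
  match s with
  | (name, ali, _, default, strictLo, hi, rangeMsg) =>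
    match pvResolve d name ali with
    | Option.none =>
      (match default with
       | Option.none => []
       | some dflt => pvVcheck name strictLo hi rangeMsg (some (pfOfInt dflt)))
    | some sv =>
      if sv == "" && default == Option.none then []
      else pvVcheck name strictLo hi rangeMsg (pyFloat? sv)

theorem pvStep_eq (d : PySem.Dict String String) (acc : List String × List String)
    (s : String × Option String × Bool × Option Int × Bool × Option Int × String) :
    pvStep d acc s = (acc.1 ++ pvRpart d s, acc.2 ++ pvVpart d s) := by
  obtain ⟨name, ali, required, default, strictLo, hi, rangeMsg⟩ := s
  have hres : (if d.get? name == Option.none || d.get? name == some "" then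
      match ali with
      | some al =>
        (match d.get? al with
         | some w => if w == "" then d.get? name else some w
         | Option.none => d.get? name)
      | Option.none => d.get? name
    else d.get? name) = pvResolve d name ali := by
    cases ali <;> simp only [pvResolve, pvOr] <;> split <;> rfl
  simp only [pvStep, pvRpart, pvVpart, hres]
  rcases hv : pvResolve d name ali with _ | sv <;>
    rcases default with _ | dflt <;>
      simp only [pvCheck, pvVcheck] <;>
      (repeat' split) <;> simp_all

theorem pv_isNoneOrEmpty_map (o : Option String) :
    pvIsNoneOrEmpty (o.map PVal.str) = (o == Option.none || o == some "") := by
  cases o <;> simp [pvIsNoneOrEmpty]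

theorem pv_norm_get_other (params : List (String × String)) (k : String)
    (h1 : k ≠ "h_retained") (h2 : k ≠ "q") (h3 : k ≠ "support") (h4 : k ≠ "z_prop") :
    (pvNormalise params).get? k = (pvG params k).map PVal.str := by
  unfold pvNormalise
  by_cases hp : params.isEmpty = true
  · have : params = [] := by simpa using hp
    subst this
    simp [pvG, PySem.Dict.ofList, PySem.Dict.update, PySem.Dict.get?_empty]
  · rw [if_neg hp]
    simp only [PySem.Dict.getD_eq_get?_getD]
    (repeat' split) <;>
      simp [PySem.Dict.get?_insert, h1, h2, h3, h4, pv_base_get, pvG]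

set_option maxHeartbeats 1000000 in
theorem pv_norm_get_h (params : List (String × String)) :
    (pvNormalise params).get? "h_retained"
      = (pvOr (pvG params "h_retained") (pvG params "h_retain")).map PVal.str := by
  unfold pvNormalise
  by_cases hp : params.isEmpty = true
  · have : params = [] := by simpa using hp
    subst this
    simp [pvG, pvOr, PySem.Dict.ofList, PySem.Dict.update, PySem.Dict.get?_empty]
  · rw [if_neg hp]
    simp only [PySem.Dict.getD_eq_get?_getD]
    (repeat' split) <;>
      simp only [PySem.Dict.get?_insert, pv_base_get, pvG, pv_isNoneOrEmpty_map, pvOr,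
        if_pos] <;>
      simp_all [pv_base_get, pv_isNoneOrEmpty_map] <;>
      rcases ha : (PySem.Dict.ofList params).get? "h_retained" with _ | a <;>
        rcases hb : (PySem.Dict.ofList params).get? "h_retain" with _ | b <;>
          simp_all [pvIsNoneOrEmpty, PySem.Dict.get?_insert, pv_base_get] <;> (repeat' split) <;>
            (try simp_all [pvIsNoneOrEmpty, PySem.Dict.get?_insert, pv_base_get]) <;> subst_vars <;> (try simp_all [pvIsNoneOrEmpty, PySem.Dict.get?_insert, pv_base_get])

set_option maxHeartbeats 1000000 in
theorem pv_norm_get_q (params : List (String × String)) :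
    (pvNormalise params).get? "q"
      = (pvOr (pvG params "q") (pvG params "surcharge_kpa")).map PVal.str := by
  unfold pvNormalise
  by_cases hp : params.isEmpty = true
  · have : params = [] := by simpa using hp
    subst this
    simp [pvG, pvOr, PySem.Dict.ofList, PySem.Dict.update, PySem.Dict.get?_empty]
  · rw [if_neg hp]
    simp only [PySem.Dict.getD_eq_get?_getD]
    (repeat' split) <;>
      simp only [PySem.Dict.get?_insert, pv_base_get, pvG, pv_isNoneOrEmpty_map, pvOr,
        if_pos] <;>
      simp_all [pv_base_get, pv_isNoneOrEmpty_map] <;>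
      rcases ha : (PySem.Dict.ofList params).get? "q" with _ | a <;>
        rcases hb : (PySem.Dict.ofList params).get? "surcharge_kpa" with _ | b <;>
          simp_all [pvIsNoneOrEmpty, PySem.Dict.get?_insert, pv_base_get]

-- Python's  not (0 < phi < 90)  versus B's  phi <= 0 or not (phi < 90)  (they differ
-- only in how nan falls out, and agree there too)
theorem pf_phi (x : PFloat) :
    (pfGT0 x = false ∨ pfLtBound x 90 = false) ↔ (pfLE0 x = true ∨ pfLtBound x 90 = false) := by
  cases x with
  | num neg n flen e =>
    simp only [pfGT0, pfLE0, pfLtBound]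
    cases neg <;> cases h : (n == 0) <;> cases pvMagLeTiny n flen e <;>
      cases pvMagLtBound n flen e 90 <;> simp
  | pinf => simp [pfGT0, pfLE0, pfLtBound]
  | ninf => simp [pfGT0, pfLE0, pfLtBound]
  | nan => simp [pfGT0, pfLE0, pfLtBound]

-- A's required-fields loop yields the three required parts of B's loop
theorem pvA_req (params : List (String × String)) :
    (["h_retained", "phi_k", "gamma"].foldl
      (fun errs f => if pvIsNoneOrEmpty ((pvNormalise params).get? f) then errs ++ ["'" ++ f ++ "' is required."] else errs) [])
    = ((([] ++ pvRpart (PySem.Dict.ofList params) ("h_retained", some "h_retain", true, some 0, true, Option.none, "h_retained must be > 0.")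
        ++ pvRpart (PySem.Dict.ofList params) ("phi_k", Option.none, true, some (-1), true, some 90, "phi_k must be in (0, 90) degrees."))
        ++ pvRpart (PySem.Dict.ofList params) ("gamma", Option.none, true, some 0, true, Option.none, "gamma must be > 0."))
        ++ pvRpart (PySem.Dict.ofList params) ("q", some "surcharge_kpa", false, some 0, false, Option.none, "q (surcharge) must be >= 0."))
        ++ pvRpart (PySem.Dict.ofList params) ("z_w", Option.none, false, Option.none, false, Option.none, "z_w must be >= 0.") := by
  simp only [List.foldl]
  rw [pv_norm_get_h, pv_norm_get_other params "phi_k" (by decide) (by decide) (by decide) (by decide),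
    pv_norm_get_other params "gamma" (by decide) (by decide) (by decide) (by decide)]
  simp only [pvRpart, pvResolve, pv_isNoneOrEmpty_map, pvG]
  split_ifs <;> simp_all

-- A's  errs ++ [msg]-or-errs  branches as an appended segment
theorem pv_ite_append (c : Prop) [Decidable c] (e l : List String) :
    (if c then e ++ l else e) = e ++ (if c then l else []) := by
  split <;> simp

-- each numeric block of A is the value part of the matching B iteration
theorem pvA_h (params : List (String × String)) (errs : List String) :
    (match pvFloatOfVal? ((pvNormalise params).getD "h_retained" (PVal.flt (pfOfInt 0))) with
     | some h => if pfLE0 h then errs ++ ["h_retained must be > 0."] else errs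
     | Option.none => errs ++ ["h_retained must be a number."])
    = errs ++ pvVpart (PySem.Dict.ofList params) ("h_retained", some "h_retain", true, some 0, true, Option.none, "h_retained must be > 0.") := by
  rw [PySem.Dict.getD_eq_get?_getD, pv_norm_get_h]
  simp only [pvVpart, pvResolve, pvG]
  rcases pvOr ((PySem.Dict.ofList params).get? "h_retained") ((PySem.Dict.ofList params).get? "h_retain") with _ | sv
  · simp [pvFloatOfVal?, pvVcheck, pv_ite_append]
  · simp only [Option.map_some, Option.getD_some, pvFloatOfVal?]
    rcases pyFloat? sv with _ | x <;> simp [pvVcheck, pv_ite_append]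

theorem pvA_phi (params : List (String × String)) (errs : List String) :
    (match pvFloatOfVal? ((pvNormalise params).getD "phi_k" (PVal.flt (pfOfInt (-1)))) with
     | some phi => if !(pfGT0 phi && pfLtBound phi 90) then errs ++ ["phi_k must be in (0, 90) degrees."] else errs
     | Option.none => errs ++ ["phi_k must be a number."])
    = errs ++ pvVpart (PySem.Dict.ofList params) ("phi_k", Option.none, true, some (-1), true, some 90, "phi_k must be in (0, 90) degrees.") := by
  rw [PySem.Dict.getD_eq_get?_getD,
    pv_norm_get_other params "phi_k" (by decide) (by decide) (by decide) (by decide)]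
  simp only [pvVpart, pvResolve, pvG]
  rcases (PySem.Dict.ofList params).get? "phi_k" with _ | sv
  · simp [pvFloatOfVal?, pvVcheck, pf_phi, pv_ite_append]
  · simp only [Option.map_some, Option.getD_some, pvFloatOfVal?]
    rcases pyFloat? sv with _ | x <;> simp [pvVcheck, pf_phi, pv_ite_append]

theorem pvA_gamma (params : List (String × String)) (errs : List String) :
    (match pvFloatOfVal? ((pvNormalise params).getD "gamma" (PVal.flt (pfOfInt 0))) with
     | some g => if pfLE0 g then errs ++ ["gamma must be > 0."] else errs
     | Option.none => errs ++ ["gamma must be a number."])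
    = errs ++ pvVpart (PySem.Dict.ofList params) ("gamma", Option.none, true, some 0, true, Option.none, "gamma must be > 0.") := by
  rw [PySem.Dict.getD_eq_get?_getD,
    pv_norm_get_other params "gamma" (by decide) (by decide) (by decide) (by decide)]
  simp only [pvVpart, pvResolve, pvG]
  rcases (PySem.Dict.ofList params).get? "gamma" with _ | sv
  · simp [pvFloatOfVal?, pvVcheck, pv_ite_append]
  · simp only [Option.map_some, Option.getD_some, pvFloatOfVal?]
    rcases pyFloat? sv with _ | x <;> simp [pvVcheck, pv_ite_append]

theorem pvA_q (params : List (String × String)) (errs : List String) :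
    (match pvFloatOfVal? ((pvNormalise params).getD "q" (PVal.flt (pfOfInt 0))) with
     | some q => if pfLT0 q then errs ++ ["q (surcharge) must be >= 0."] else errs
     | Option.none => errs ++ ["q must be a number."])
    = errs ++ pvVpart (PySem.Dict.ofList params) ("q", some "surcharge_kpa", false, some 0, false, Option.none, "q (surcharge) must be >= 0.") := by
  rw [PySem.Dict.getD_eq_get?_getD, pv_norm_get_q]
  simp only [pvVpart, pvResolve, pvG]
  rcases pvOr ((PySem.Dict.ofList params).get? "q") ((PySem.Dict.ofList params).get? "surcharge_kpa") with _ | sv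
  · simp [pvFloatOfVal?, pvVcheck, pv_ite_append]
  · simp only [Option.map_some, Option.getD_some, pvFloatOfVal?]
    rcases pyFloat? sv with _ | x <;> simp [pvVcheck, pv_ite_append]

theorem pvA_zw (params : List (String × String)) (errs : List String) :
    (if pvIsNoneOrEmpty ((pvNormalise params).get? "z_w") then errs
     else match (pvNormalise params).get? "z_w" with
      | some v =>
        (match pvFloatOfVal? v with
         | some z => if pfLT0 z then errs ++ ["z_w must be >= 0."] else errs
         | Option.none => errs ++ ["z_w must be a number."])
      | Option.none => errs)
    = errs ++ pvVpart (PySem.Dict.ofList params) ("z_w", Option.none, false, Option.none, false, Option.none, "z_w must be >= 0.") := by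
  rw [pv_norm_get_other params "z_w" (by decide) (by decide) (by decide) (by decide)]
  simp only [pvVpart, pvResolve, pvG, pv_isNoneOrEmpty_map]
  rcases (PySem.Dict.ofList params).get? "z_w" with _ | sv
  · simp
  · by_cases hs : sv = ""
    · simp [hs]
    · simp only [Option.map_some, pvFloatOfVal?]
      rcases pyFloat? sv with _ | x <;> simp [pvVcheck, hs, pv_ite_append]

-- ===== VERDICT =====
theorem validate_sheet_pile_params_spec : Claim_equal_validate_sheet_pile_params := by
  intro params _
  unfold Spec_validate_sheet_pile_params
  simp only [validate_sheet_pile_params_alt, pvSpecs, List.foldl, pvStep_eq]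
  simp only [validate_sheet_pile_params]
  rw [pvA_req, pvA_h, pvA_phi, pvA_gamma, pvA_q, pvA_zw]
  simp [List.append_assoc]
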